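-- pv_equiv track=rewrite | github.com/utkarshminhas/violence-detection-fyp | preprocessing/holi_approach.py | clean_contours
-- ===== SOURCE A (Python) =====
-- from functools import cmp_to_key
--
-- def clean_contours(contours):
--   def is_contour_overlapping(i, j): # Is i completely inside j?
--       (ix, iy, iw, ih) = i
--       (jx, jy, jw, jh) = j
--
--       return ix > jx and ix + iw < jx + jw and iy > jy and iy + ih < jy + jh
--
--
--   cleaned_contours = []
--   contours = sorted(contours, key=cmp_to_key(lambda c1, c2: c2[2] * c2[3] - c1[2] * c1[3]))
--
--   for i in range(len(contours)):
--     for j in range(i):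
--       (ix, iy, iw, ih) = contours[i]
--       (jx, jy, jw, jh) = contours[j]
--
--       if is_contour_overlapping(contours[i], contours[j]):
--         break
--     else:
--       cleaned_contours.append(contours[i])
--
--   return cleaned_contours
-- ===== SOURCE B (Python) =====
-- def clean_contours(contours):
--   def strictly_inside(c, o):  # Is c completely inside o?
--       (cx, cy, cw, ch) = c
--       (ox, oy, ow, oh) = o
--       return ox < cx and cx + cw < ox + ow and oy < cy and cy + ch < oy + oh
--
--   kept = [c for c in contours if not any(strictly_inside(c, o) for o in contours)]
--   return sorted(kept, key=lambda c: c[2] * c[3], reverse=True)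
-- ===== Notes on version B (the rewrite author's own statement) =====
-- stated objective: simpler
-- what changed: Instead of sorting first and scanning the triangular prefix of the sorted list, B filters the original list in one comprehension (keep a contour iff no other contour strictly contains it; self-comparison is never true) and then sorts the kept contours by area descending, which reproduces A's order because strict containment implies strictly larger area and the sort is stable.
import Mathlib
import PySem

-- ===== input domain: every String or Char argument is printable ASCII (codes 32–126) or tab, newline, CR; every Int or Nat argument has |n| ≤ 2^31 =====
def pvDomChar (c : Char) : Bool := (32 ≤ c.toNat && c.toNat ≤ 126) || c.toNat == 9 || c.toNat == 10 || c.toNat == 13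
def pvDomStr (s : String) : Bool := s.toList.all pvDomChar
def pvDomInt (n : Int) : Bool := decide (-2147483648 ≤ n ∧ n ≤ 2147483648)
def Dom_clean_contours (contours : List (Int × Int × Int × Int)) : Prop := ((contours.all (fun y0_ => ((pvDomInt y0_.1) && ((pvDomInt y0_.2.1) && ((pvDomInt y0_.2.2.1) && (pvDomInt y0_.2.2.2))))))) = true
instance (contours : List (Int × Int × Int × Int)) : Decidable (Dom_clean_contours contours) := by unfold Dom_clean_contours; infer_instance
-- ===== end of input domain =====

-- B replaces A's sort-then-triangular-prefix-scan by a whole-list containment filter followed by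
-- one stable sort by area descending (simpler decomposition, same O(n^2) cost).

-- ===== PORT A =====
-- Python's chained comparison 'ix > jx and ix + iw < jx + jw and iy > jy and iy + ih < jy + jh'
def pvIsContourOverlapping (i j : Int × Int × Int × Int) : Bool :=
  decide (i.1 > j.1 ∧ i.1 + i.2.2.1 < j.1 + j.2.2.1 ∧ i.2.1 > j.2.1 ∧ i.2.1 + i.2.2.2 < j.2.1 + j.2.2.2)

-- sorted(contours, key=cmp_to_key(lambda c1, c2: c2[2]*c2[3] - c1[2]*c1[3])) is exactly the stable
-- sort by area descending: PySem.List.sorted with key = area and reverse = true.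
-- The for/else over range(len)/range(i) with break is the foldl over pyRange with an inner 'any'.
def clean_contours (contours : List (Int × Int × Int × Int)) : List (Int × Int × Int × Int) :=
  let contours1 := PySem.List.sorted contours (fun c => c.2.2.1 * c.2.2.2) true
  (PySem.List.pyRange 0 (PySem.List.len contours1)).foldl
    (fun cleaned_contours i =>
      if (PySem.List.pyRange 0 i).any (fun j =>
            pvIsContourOverlapping (PySem.List.pyGetD contours1 i (0, 0, 0, 0))
              (PySem.List.pyGetD contours1 j (0, 0, 0, 0)))
      then cleaned_contours
      else cleaned_contours ++ [PySem.List.pyGetD contours1 i (0, 0, 0, 0)]) []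

-- ===== PORT B =====
def pvStrictlyInside (c o : Int × Int × Int × Int) : Bool :=
  decide (o.1 < c.1 ∧ c.1 + c.2.2.1 < o.1 + o.2.2.1 ∧ o.2.1 < c.2.1 ∧ c.2.1 + c.2.2.2 < o.2.1 + o.2.2.2)

def clean_contours_alt (contours : List (Int × Int × Int × Int)) : List (Int × Int × Int × Int) :=
  let kept := contours.filter (fun c => !(contours.any (fun o => pvStrictlyInside c o)))
  PySem.List.sorted kept (fun c => c.2.2.1 * c.2.2.2) true

-- ===== PRECONDITION & SPEC =====
-- Pre_ excludes lists where some contour strictly contains another without having strictly larger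
-- area: that needs a non-positive width or height, i.e. a degenerate "rectangle" for which neither
-- program's notion of containment-vs-size is more correct than the other's, so no kept set is the
-- specified one there.
def Pre_clean_contours (contours : List (Int × Int × Int × Int)) : Prop :=
  ∀ c ∈ contours, ∀ o ∈ contours,
    (o.1 < c.1 ∧ c.1 + c.2.2.1 < o.1 + o.2.2.1 ∧ o.2.1 < c.2.1 ∧ c.2.1 + c.2.2.2 < o.2.1 + o.2.2.2) →
    c.2.2.1 * c.2.2.2 < o.2.2.1 * o.2.2.2
instance (contours : List (Int × Int × Int × Int)) : Decidable (Pre_clean_contours contours) := by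
  unfold Pre_clean_contours; infer_instance
def pvWitness_clean_contours : (List (Int × Int × Int × Int)) := [(0, 0, 10, 10), (2, 2, 3, 3)]

def Spec_clean_contours (contours : List (Int × Int × Int × Int)) (out : List (Int × Int × Int × Int)) : Prop := out = clean_contours_alt contours
instance (contours : List (Int × Int × Int × Int)) (out : List (Int × Int × Int × Int)) : Decidable (Spec_clean_contours contours out) := by unfold Spec_clean_contours; infer_instance

-- ===== CLAIM (what is proved, stated in full; the proofs are below) =====
def Claim_equal_clean_contours : Prop := ∀ (contours : List (Int × Int × Int × Int)), Dom_clean_contours contours → Pre_clean_contours contours → Spec_clean_contours contours (clean_contours contours)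

-- ===== LEMMAS AND PROOFS =====

-- insertBy (descending order) puts x in front when every element is strictly smaller under the key.
lemma pv_insertBy_front {α : Type} (key : α → Int) (x : α) (zs : List α)
    (h : ∀ z ∈ zs, key z < key x) :
    PySem.List.insertBy (fun a b => decide (key b < key a)) x zs = x :: zs := by
  cases zs with
  | nil => rfl
  | cons z t =>
      simp [PySem.List.insertBy, h z (by simp)]

-- insertBy preserves the descending pairwise order.
lemma pv_pairwise_insertBy {α : Type} (key : α → Int) (x : α) (ys : List α)
    (h : ys.Pairwise (fun a b => key b ≤ key a)) :
    (PySem.List.insertBy (fun a b => decide (key b < key a)) x ys).Pairwise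
      (fun a b => key b ≤ key a) := by
  induction ys with
  | nil => simp [PySem.List.insertBy]
  | cons y ys ih =>
      rcases List.pairwise_cons.mp h with ⟨hy, hys⟩
      by_cases hb : key y < key x
      · simp only [PySem.List.insertBy, hb, decide_true]
        refine List.pairwise_cons.mpr ⟨?_, h⟩
        intro z hz
        rcases List.mem_cons.mp hz with rfl | hz
        · omega
        · have := hy z hz; omega
      · simp only [PySem.List.insertBy, hb, decide_false, Bool.false_eq_true, if_false]
        refine List.pairwise_cons.mpr ⟨?_, ih hys⟩
        intro z hz
        rcases (PySem.List.mem_insertBy _ _ _ _).mp hz with rfl | hz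
        · omega
        · exact hy z hz

-- filter commutes with insertBy into a descending-sorted list.
lemma pv_filter_insertBy {α : Type} (key : α → Int) (p : α → Bool) (x : α) (ys : List α)
    (h : ys.Pairwise (fun a b => key b ≤ key a)) :
    (PySem.List.insertBy (fun a b => decide (key b < key a)) x ys).filter p =
      if p x then PySem.List.insertBy (fun a b => decide (key b < key a)) x (ys.filter p)
      else ys.filter p := by
  induction ys with
  | nil =>
      by_cases hx : p x <;> simp [PySem.List.insertBy, hx]
  | cons y ys ih =>
      rcases List.pairwise_cons.mp h with ⟨hy, hys⟩
      by_cases hb : key y < key x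
      · simp only [PySem.List.insertBy, hb, decide_true]
        by_cases hpy : p y
        · by_cases hpx : p x <;>
            simp [hpx, hpy, PySem.List.insertBy, hb]
        · have hfront : PySem.List.insertBy (fun a b => decide (key b < key a)) x
              (ys.filter p) = x :: ys.filter p := by
            refine pv_insertBy_front key x _ ?_
            intro z hz
            have := hy z (List.mem_of_mem_filter hz); omega
          by_cases hpx : p x <;> simp [hpx, hpy, hfront]
      · simp only [PySem.List.insertBy, hb, decide_false, Bool.false_eq_true, if_false]
        by_cases hpy : p y
        · by_cases hpx : p x <;>
            simp [hpy, hpx, ih hys, PySem.List.insertBy, hb]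
        · by_cases hpx : p x <;> simp [hpy, hpx, ih hys]

-- filter commutes with the whole insertion-sort fold.
lemma pv_filter_foldl_insertBy {α : Type} (key : α → Int) (p : α → Bool) :
    ∀ (xs acc : List α), acc.Pairwise (fun a b => key b ≤ key a) →
    (xs.foldl (fun acc x => PySem.List.insertBy (fun a b => decide (key b < key a)) x acc) acc).filter p =
      (xs.filter p).foldl
        (fun acc x => PySem.List.insertBy (fun a b => decide (key b < key a)) x acc) (acc.filter p) := by
  intro xs
  induction xs with
  | nil => intro acc _; simp
  | cons x xs ih =>
      intro acc hacc
      have hstep := ih (PySem.List.insertBy (fun a b => decide (key b < key a)) x acc)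
        (pv_pairwise_insertBy key x acc hacc)
      by_cases hpx : p x
      · simp only [List.foldl_cons, List.filter_cons, hpx]
        rw [hstep, pv_filter_insertBy key p x acc hacc]
        simp [hpx]
      · simp only [List.foldl_cons, List.filter_cons, hpx]
        rw [hstep, pv_filter_insertBy key p x acc hacc]
        simp [hpx]

-- stable reverse sort commutes with filter.
lemma pv_filter_sorted_rev {α : Type} (key : α → Int) (p : α → Bool) (xs : List α) :
    (PySem.List.sorted xs key true).filter p = PySem.List.sorted (xs.filter p) key true := by
  rw [PySem.List.sorted_rev_eq_foldl_insertBy, PySem.List.sorted_rev_eq_foldl_insertBy]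
  simpa using pv_filter_foldl_insertBy key p xs [] List.Pairwise.nil

-- The two containment tests are the same Boolean.
lemma pv_inside_eq (c o : Int × Int × Int × Int) :
    pvIsContourOverlapping c o = pvStrictlyInside c o := by
  rfl

-- In the sorted list, "some strictly earlier element contains s[i]" is "some element of the whole
-- list contains s[i]" (under Pre_: a container has strictly larger area, so it sorts strictly earlier).
lemma pv_cond_eq (contours : List (Int × Int × Int × Int)) (hpre : Pre_clean_contours contours)
    (i : Int) (hi : i ∈ PySem.List.pyRange 0 (PySem.List.len (PySem.List.sorted contours (fun c => c.2.2.1 * c.2.2.2) true))) :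
    ((PySem.List.pyRange 0 i).any (fun j =>
        pvIsContourOverlapping
          (PySem.List.pyGetD (PySem.List.sorted contours (fun c => c.2.2.1 * c.2.2.2) true) i (0, 0, 0, 0))
          (PySem.List.pyGetD (PySem.List.sorted contours (fun c => c.2.2.1 * c.2.2.2) true) j (0, 0, 0, 0)))) =
      (contours.any (fun o =>
        pvStrictlyInside
          (PySem.List.pyGetD (PySem.List.sorted contours (fun c => c.2.2.1 * c.2.2.2) true) i (0, 0, 0, 0)) o)) := by
  set s := PySem.List.sorted contours (fun c => c.2.2.1 * c.2.2.2) true with hs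
  have hlen : PySem.List.len s = (s.length : Int) := by simp [PySem.List.len_eq]
  rw [hlen] at hi
  rcases PySem.List.mem_pyRange_one.mp hi with ⟨hi0, hilt⟩
  have hiN : i.toNat < s.length := by omega
  have hgi : PySem.List.pyGetD s i (0, 0, 0, 0) = s[i.toNat] :=
    PySem.List.pyGetD_eq_getElem s _ hi0 (by omega)
  have hmem_s : ∀ x, x ∈ s ↔ x ∈ contours := fun x => PySem.List.mem_sorted contours _ true x
  have hpair : ∀ (p q : Nat) (hpq : p < q) (hq : q < s.length),
      (fun c : Int × Int × Int × Int => c.2.2.1 * c.2.2.2) s[q] ≤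
        (fun c : Int × Int × Int × Int => c.2.2.1 * c.2.2.2) s[p] := by
    have := PySem.List.sorted_pairwise_rev contours (fun c : Int × Int × Int × Int => c.2.2.1 * c.2.2.2)
    rw [← hs] at this
    intro p q hpq hq
    exact List.pairwise_iff_getElem.mp this p q (by omega) hq hpq
  apply Bool.eq_iff_iff.mpr
  simp only [List.any_eq_true]
  constructor
  · rintro ⟨j, hj, hins⟩
    rcases PySem.List.mem_pyRange_one.mp hj with ⟨hj0, hjlt⟩
    refine ⟨PySem.List.pyGetD s j (0, 0, 0, 0), ?_, ?_⟩
    · exact (hmem_s _).mp (PySem.List.pyGetD_mem s _ ⟨by omega, by omega⟩)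
    · rw [← pv_inside_eq]; exact hins
  · rintro ⟨o, ho, hins⟩
    have hos : o ∈ s := (hmem_s o).mpr ho
    rcases List.mem_iff_getElem.mp hos with ⟨m, hm, hsm⟩
    rw [hgi] at hins
    have hci : s[i.toNat] ∈ contours := (hmem_s _).mp (List.getElem_mem hiN)
    have harea : s[i.toNat].2.2.1 * s[i.toNat].2.2.2 < o.2.2.1 * o.2.2.2 := by
      apply hpre _ hci _ ho
      exact of_decide_eq_true (by simpa [pvStrictlyInside] using hins)
    have hmi : m < i.toNat := by
      by_contra hge
      rcases Nat.lt_or_ge i.toNat m with hlt | hge2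
      · have := hpair i.toNat m hlt hm
        simp only at this
        rw [hsm] at this
        omega
      · have : m = i.toNat := by omega
        subst this
        rw [hsm] at harea
        omega
    refine ⟨(m : Int), PySem.List.mem_pyRange_one.mpr ⟨by omega, by omega⟩, ?_⟩
    rw [pv_inside_eq, hgi]
    have hgj : PySem.List.pyGetD s (m : Int) (0, 0, 0, 0) = s[m] := by
      simpa using PySem.List.pyGetD_eq_getElem s (0, 0, 0, 0) (i := (m : Int)) (by omega) (by simpa using hm)
    rw [hgj, hsm]
    exact hins

-- ===== VERDICT (by name: the statement is the Claim_ definition above) =====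
theorem clean_contours_spec : Claim_equal_clean_contours := by
  intro contours _ hpre
  unfold Spec_clean_contours clean_contours clean_contours_alt
  set key : Int × Int × Int × Int → Int := fun c => c.2.2.1 * c.2.2.2 with hkey
  set s := PySem.List.sorted contours key true with hs
  set p : Int × Int × Int × Int → Bool :=
    fun c => !(contours.any (fun o => pvStrictlyInside c o)) with hp
  have h1 : (PySem.List.pyRange 0 (PySem.List.len s)).foldl
      (fun cleaned i =>
        if (PySem.List.pyRange 0 i).any (fun j =>
              pvIsContourOverlapping (PySem.List.pyGetD s i (0, 0, 0, 0))
                (PySem.List.pyGetD s j (0, 0, 0, 0)))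
        then cleaned else cleaned ++ [PySem.List.pyGetD s i (0, 0, 0, 0)]) [] =
      (PySem.List.pyRange 0 (PySem.List.len s)).foldl
      (fun cleaned i =>
        if p (PySem.List.pyGetD s i (0, 0, 0, 0)) then
          cleaned ++ [PySem.List.pyGetD s i (0, 0, 0, 0)]
        else cleaned) [] := by
    apply PySem.List.foldl_congr_mem
    intro acc i hi
    rw [pv_cond_eq contours hpre i hi, ← hs]
    cases hq : contours.any (fun o =>
        pvStrictlyInside (PySem.List.pyGetD s i (0, 0, 0, 0)) o) <;>
      simp only [hp, hq, Bool.not_true, Bool.not_false, Bool.false_eq_true, if_true, if_false]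
  rw [h1]
  have h2 := PySem.List.foldl_pyRange_zero_pyGetD s (0, 0, 0, 0)
    (fun (acc : List (Int × Int × Int × Int)) x => if p x then acc ++ [x] else acc) []
  rw [h2]
  have h3 := PySem.List.foldl_append_if p (fun x => x) s []
  simp only [List.nil_append] at h3
  rw [h3, List.map_id']
  exact pv_filter_sorted_rev key p contours
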